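-- pv_equiv track=rewrite | github.com/dannyk1003/2022_python_course | counter3.2.py | is_operator_double
-- ===== SOURCE A (Python) =====
-- def operator_counter(formula):
--     '''
--     判斷哪幾個是運算元;
--     x = formula;
--     return = list[ ]
--     '''
--     op_counter = []
--     for i, formula_element in enumerate(list(formula)):
--         #enumerate 將內容編號 [(0, "A"), (1, "B"), (2, "C")...]
--         if is_operator(formula_element):
--             op_counter.append(i)
--     return op_counter
--
-- def is_operator(formula_element):
--     '''
--     判斷是否為運算元
--     '''
--     operator_element = ["+", "-", "*", "/", "(", ")"]
--     for i in list(formula_element):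
--         if i not in operator_element: # formula中存在非formula_element元素
--             return False
--     return True
--
-- def is_operator_double(formula): #[3,6]
--     '''
--     判斷是否有連續的運算元
--     '''
--     op_counter = operator_counter(formula)
--     op_list = operator_list(formula)
--     for i in range(len(op_counter)-1):
--         if op_counter[i+1] - op_counter[i] == 1: # 運算原相鄰
--             if op_list[i] in ["+", "-", "*", "/"]:
--                 if op_list[i+1] != "(":
--                     return False
--             if op_list[i] == "(":
--                 if op_list[i+1] in ["+", "-", "*", "/"]:
--                     return False
--             if op_list[i] == ")":
--                 if op_list[i+1] == "(":
--                     return False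
--     return True
--
-- def operator_list(formula): # x = operator_count [3, 6], y = formula
--     '''
--     運算原有哪些(加順序)
--     '''
--     op_counter = operator_counter(formula)
--     op_list = []
--     formula_list = list(formula)
--     for i in op_counter:
--         op_list.append(formula_list[i])
--     return op_list #["+","+"]
-- ===== SOURCE B (Python) =====
-- def is_operator_double(formula):
--     ops = "+-*/()"
--     prev = None  # previous character if (and only if) it was an operator
--     for c in formula:
--         if prev is not None and c in ops:
--             if prev in "+-*/" and c != '(':
--                 return False
--             if prev == '(' and c in "+-*/":
--                 return False
--             if prev == ')' and c == '(':
--                 return False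
--         prev = c if c in ops else None
--     return True
-- ===== Notes on version B (the rewrite author's own statement) =====
-- stated objective: simpler
-- what changed: Replaced the three list-building passes (operator position list, operator character list, then an index loop comparing positions) by a single pass over the characters that tracks the previous character when it was an operator and applies the forbidden-pair rules directly to adjacent characters.
import Mathlib
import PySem

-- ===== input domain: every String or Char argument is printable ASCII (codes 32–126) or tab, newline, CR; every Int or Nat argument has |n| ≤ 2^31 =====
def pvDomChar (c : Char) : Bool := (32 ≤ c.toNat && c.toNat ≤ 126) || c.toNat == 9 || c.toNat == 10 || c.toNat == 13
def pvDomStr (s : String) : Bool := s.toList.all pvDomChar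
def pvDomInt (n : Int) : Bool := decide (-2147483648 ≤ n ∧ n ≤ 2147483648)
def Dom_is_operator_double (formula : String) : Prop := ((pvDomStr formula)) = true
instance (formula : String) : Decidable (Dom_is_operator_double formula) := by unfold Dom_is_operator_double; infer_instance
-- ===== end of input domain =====

-- B replaces A's three list-building passes by one pass over adjacent characters (simpler; measured constant-factor faster).

-- ===== PORT A =====
def opElems : List Char := ['+', '-', '*', '/', '(', ')']

-- is_operator: Python loops over list(formula_element); here the element is one char
def is_operator (fe : Char) : Bool :=
  [fe].all (fun i => decide (i ∈ opElems))

def operator_counter (formula : String) : List Int :=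
  (PySem.List.enumerate formula.toList 0).foldl
    (fun acc p => if is_operator p.2 then acc ++ [p.1] else acc) []

-- formula_list[i]: index is always in range here, so pyGetD with a default is exact
def operator_list (formula : String) : List Char :=
  (operator_counter formula).foldl
    (fun acc i => acc ++ [PySem.List.pyGetD formula.toList i ' ']) []

def loopA (oc : List Int) (ol : List Char) : List Int → Bool
  | [] => true
  | i :: rest =>
    if PySem.List.pyGetD oc (i + 1) 0 - PySem.List.pyGetD oc i 0 = 1 then
      if PySem.List.pyGetD ol i ' ' ∈ ['+', '-', '*', '/'] ∧ PySem.List.pyGetD ol (i + 1) ' ' ≠ '(' then false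
      else if PySem.List.pyGetD ol i ' ' = '(' ∧ PySem.List.pyGetD ol (i + 1) ' ' ∈ ['+', '-', '*', '/'] then false
      else if PySem.List.pyGetD ol i ' ' = ')' ∧ PySem.List.pyGetD ol (i + 1) ' ' = '(' then false
      else loopA oc ol rest
    else loopA oc ol rest

def is_operator_double (formula : String) : Bool :=
  let oc := operator_counter formula
  let ol := operator_list formula
  loopA oc ol (PySem.List.pyRange 0 ((oc.length : Int) - 1) 1)

-- ===== PORT B =====
def opsB : List Char := ['+', '-', '*', '/', '(', ')']
def bopsB : List Char := ['+', '-', '*', '/']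

def altLoop : Option Char → List Char → Bool
  | _, [] => true
  | prev, c :: rest =>
    match prev with
    | some p =>
      if c ∈ opsB then
        if p ∈ bopsB ∧ c ≠ '(' then false
        else if p = '(' ∧ c ∈ bopsB then false
        else if p = ')' ∧ c = '(' then false
        else altLoop (if c ∈ opsB then some c else none) rest
      else altLoop (if c ∈ opsB then some c else none) rest
    | none => altLoop (if c ∈ opsB then some c else none) rest

def is_operator_double_alt (formula : String) : Bool :=
  altLoop none formula.toList

-- ===== PRECONDITION & SPEC =====
def Spec_is_operator_double (formula : String) (out : Bool) : Prop := out = is_operator_double_alt formula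
instance (formula : String) (out : Bool) : Decidable (Spec_is_operator_double formula out) := by unfold Spec_is_operator_double; infer_instance

-- ===== CLAIM (what is proved, stated in full; the proofs are below) =====
def Claim_equal_is_operator_double : Prop := ∀ (formula : String), Dom_is_operator_double formula → Spec_is_operator_double formula (is_operator_double formula)

-- ===== LEMMAS AND PROOFS =====

-- proof-side: the list of (index, char) of operator characters, starting at offset k
def opsOf : List Char → Int → List (Int × Char)
  | [], _ => []
  | c :: l, k => if is_operator c then (k, c) :: opsOf l (k + 1) else opsOf l (k + 1)

-- proof-side: A's pairwise check, rephrased structurally on the (index, char) list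
def chain : List (Int × Char) → Bool
  | [] => true
  | [_] => true
  | (i, p) :: (j, q) :: rest =>
    if j - i = 1 then
      if p ∈ ['+', '-', '*', '/'] ∧ q ≠ '(' then false
      else if p = '(' ∧ q ∈ ['+', '-', '*', '/'] then false
      else if p = ')' ∧ q = '(' then false
      else chain ((j, q) :: rest)
    else chain ((j, q) :: rest)

theorem opsOf_filter (l : List Char) (k : Int) :
    (PySem.List.enumerate l k).filter (fun x => is_operator x.2) = opsOf l k := by
  induction l generalizing k with
  | nil => simp [PySem.List.enumerate_nil, opsOf]
  | cons c l ih =>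
    simp only [PySem.List.enumerate_cons, List.filter_cons, opsOf]
    by_cases h : is_operator c = true <;> simp [h, ih]

theorem operator_counter_eq (s : String) :
    operator_counter s = (opsOf s.toList 0).map Prod.fst := by
  unfold operator_counter
  rw [PySem.List.foldl_append_if, opsOf_filter]
  simp

theorem opsOf_mem_get (l : List Char) (k : Int) (i : Int) (c : Char)
    (h : (i, c) ∈ opsOf l k) : ∃ m : Nat, i = k + m ∧ l[m]? = some c := by
  induction l generalizing k with
  | nil => simp [opsOf] at h
  | cons c' l ih =>
    simp only [opsOf] at h
    by_cases hop : is_operator c' = true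
    · simp [hop] at h
      rcases h with ⟨h1, h2⟩ | h
      · exact ⟨0, by simp [h1, h2]⟩
      · rcases ih (k + 1) h with ⟨m, hm1, hm2⟩
        exact ⟨m + 1, by push_cast; omega, by simpa using hm2⟩
    · simp [hop] at h
      rcases ih (k + 1) h with ⟨m, hm1, hm2⟩
      exact ⟨m + 1, by push_cast; omega, by simpa using hm2⟩

theorem operator_list_eq (s : String) :
    operator_list s = (opsOf s.toList 0).map Prod.snd := by
  unfold operator_list
  rw [PySem.List.foldl_append_singleton_eq_map, operator_counter_eq]
  simp only [List.nil_append, List.map_map]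
  apply List.map_congr_left
  intro a ha
  rcases opsOf_mem_get s.toList 0 a.1 a.2 (by simpa using ha) with ⟨m, hm1, hm2⟩
  simp only [Function.comp_apply]
  rw [hm1]
  simp [PySem.List.pyGetD_natCast, List.getD_eq_getElem?_getD, hm2]

theorem opsOf_head_ge (l : List Char) (k : Int) (i : Int) (c : Char)
    (rest : List (Int × Char)) (h : opsOf l k = (i, c) :: rest) : k ≤ i := by
  induction l generalizing k with
  | nil => simp [opsOf] at h
  | cons c' l ih =>
    simp only [opsOf] at h
    by_cases hop : is_operator c' = true
    · simp [hop] at h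
      omega
    · simp [hop] at h
      have := ih (k + 1) h
      omega

theorem chain_main (l : List Char) (k : Int) :
    chain (opsOf l k) = altLoop none l ∧
    ∀ p : Char, p ∈ opsB → chain ((k - 1, p) :: opsOf l k) = altLoop (some p) l := by
  induction l generalizing k with
  | nil => exact ⟨rfl, fun p _ => rfl⟩
  | cons c l ih =>
    have hopB : (c ∈ opsB) ↔ is_operator c = true := by
      simp [is_operator, opsB, opElems]
    by_cases hop : is_operator c = true
    · have hc : c ∈ opsB := hopB.mpr hop
      have h2 := (ih (k + 1)).2 c hc
      have ek : k + 1 - 1 = k := by omega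
      rw [ek] at h2
      constructor
      · simp only [opsOf, hop, if_pos, altLoop, hc]
        simpa [hc] using h2
      · intro p hp
        simp only [opsOf, hop, if_pos, chain, altLoop]
        simp [hc, bopsB, show k - (k - 1) = 1 by omega, h2]
    · have hc : ¬ (c ∈ opsB) := fun h => hop (hopB.mp h)
      have h1 := (ih (k + 1)).1
      have hskip : ∀ p : Char, chain ((k - 1, p) :: opsOf l (k + 1)) = chain (opsOf l (k + 1)) := by
        intro p
        cases hse : opsOf l (k + 1) with
        | nil => rfl
        | cons q rest =>
          obtain ⟨j, q2⟩ := q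
          have hge := opsOf_head_ge l (k + 1) j q2 rest hse
          simp only [chain]
          rw [if_neg (by omega)]
      constructor
      · simp only [opsOf, hop, altLoop]
        simp [hc, h1]
      · intro p hp
        simp only [opsOf, hop, altLoop]
        simp [hc, hskip p, h1]

theorem chain_short (ps : List (Int × Char)) (h : ps.length ≤ 1) : chain ps = true := by
  match ps with
  | [] => rfl
  | [x] => rfl

theorem loopA_eq_chain (ps : List (Int × Char)) (d j : Nat) (hd : ps.length ≤ j + d) :
    loopA (ps.map Prod.fst) (ps.map Prod.snd) (PySem.List.pyRange (j : Int) (((ps.map Prod.fst).length : Int) - 1) 1) = chain (ps.drop j) := by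
  induction d generalizing j with
  | zero =>
    rw [PySem.List.pyRange_one_eq_nil (by simp; omega)]
    rw [List.drop_eq_nil_of_le (by omega)]
    rfl
  | succ d ih =>
    by_cases hj : j + 1 < ps.length
    · rw [PySem.List.pyRange_one_cons (by simp; omega)]
      have hjl : j < ps.length := by omega
      have e1 : PySem.List.pyGetD (ps.map Prod.fst) (((j + 1 : Nat)) : Int) 0 = (ps[j + 1]'hj).1 := by
        rw [PySem.List.pyGetD_natCast, List.getD_eq_getElem _ _ (by simpa using hj)]
        simp
      have e2 : PySem.List.pyGetD (ps.map Prod.fst) ((j : Int)) 0 = (ps[j]'hjl).1 := by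
        rw [PySem.List.pyGetD_natCast, List.getD_eq_getElem _ _ (by simpa using hjl)]
        simp
      have e3 : PySem.List.pyGetD (ps.map Prod.snd) (((j + 1 : Nat)) : Int) ' ' = (ps[j + 1]'hj).2 := by
        rw [PySem.List.pyGetD_natCast, List.getD_eq_getElem _ _ (by simpa using hj)]
        simp
      have e4 : PySem.List.pyGetD (ps.map Prod.snd) ((j : Int)) ' ' = (ps[j]'hjl).2 := by
        rw [PySem.List.pyGetD_natCast, List.getD_eq_getElem _ _ (by simpa using hjl)]
        simp
      have hdj : ps.drop j = ps[j]'hjl :: ps[j + 1]'hj :: ps.drop (j + 2) := by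
        rw [List.drop_eq_getElem_cons hjl, List.drop_eq_getElem_cons hj]
      have hih := ih (j + 1) (by omega)
      rcases hA : ps[j]'hjl with ⟨i1, c1⟩
      rcases hB : ps[j + 1]'hj with ⟨i2, c2⟩
      rw [hdj, hA, hB]
      have hd1 : ps.drop (j + 1) = (i2, c2) :: ps.drop (j + 2) := by
        rw [List.drop_eq_getElem_cons hj, hB]
      rw [hd1] at hih
      simp only [loopA, chain]
      rw [show ((j : Int) + 1) = ((j + 1 : Nat) : Int) by push_cast; ring]
      rw [e1, e2, e3, e4, hA, hB, hih]
    · rw [PySem.List.pyRange_one_eq_nil (by simp; omega)]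
      exact (chain_short _ (by simp [List.length_drop]; omega)).symm

-- ===== VERDICT (by name: the statement is the Claim_ definition above) =====
theorem is_operator_double_spec : Claim_equal_is_operator_double := by
  intro s _
  unfold Spec_is_operator_double is_operator_double is_operator_double_alt
  have h := loopA_eq_chain (opsOf s.toList 0) (opsOf s.toList 0).length 0 (by omega)
  simp only [Nat.cast_zero, List.drop_zero] at h
  simp only [operator_counter_eq, operator_list_eq, h]
  exact (chain_main s.toList 0).1
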